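-- pv_equiv track=rewrite | github.com/Rajasekhar1131997/TIP102_Sessions | Unit_3/Week3Session2_SPSV2.py | final_supply_costs
-- ===== SOURCE A (Python) =====
-- def final_supply_costs(costs):
--     n = len(costs)
--     final_costs = [0] * n
--     if not costs:
--         return []
--     if len(costs) == 1:
--         return costs
--     for i in range(n):
--         discount = 0
--         for j in range(i+1, n):
--             if costs[j] <= costs[i]:
--                 discount = costs[j]
--                 break
--         final_costs[i] = costs[i] - discount
--     return final_costs
-- ===== SOURCE B (Python) =====
-- def final_supply_costs(costs):
--     # Monotonic stack, right-to-left: the next element <= costs[i] is found in O(n) total.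
--     stack = []
--     res = []
--     for x in reversed(costs):
--         while stack and stack[-1] > x:
--             stack.pop()
--         res.append(x - (stack[-1] if stack else 0))
--         stack.append(x)
--     res.reverse()
--     return res
-- ===== Notes on version B (the rewrite author's own statement) =====
-- stated objective: faster
-- what changed: Replaces the per-index forward scan for the next element <= costs[i] with a single right-to-left pass maintaining a monotonic stack.
import Mathlib
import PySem

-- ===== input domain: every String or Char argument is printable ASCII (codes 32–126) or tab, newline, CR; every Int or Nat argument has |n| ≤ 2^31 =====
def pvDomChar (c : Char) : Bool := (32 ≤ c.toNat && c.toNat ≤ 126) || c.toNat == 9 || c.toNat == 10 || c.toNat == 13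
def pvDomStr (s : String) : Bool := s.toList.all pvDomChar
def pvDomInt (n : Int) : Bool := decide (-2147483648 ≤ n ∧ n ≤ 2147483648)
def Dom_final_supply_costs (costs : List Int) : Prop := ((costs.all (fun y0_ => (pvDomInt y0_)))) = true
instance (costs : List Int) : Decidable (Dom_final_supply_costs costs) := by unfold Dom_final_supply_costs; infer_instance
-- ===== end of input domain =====

-- B replaces A's quadratic per-index forward scan with one right-to-left monotonic-stack pass (asymptotically faster).

-- ===== PORT A =====
-- inner loop 'for j in range(i+1, n): if costs[j] <= costs[i]: discount = costs[j]; break'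
-- ported over the list of indices j; costs.getD j 0 is exact since every scanned index satisfies 0 ≤ j < n
def pvInnerA (costs : List Int) (x : Int) : List Nat → Int
  | [] => 0
  | j :: js => let cj := costs.getD j 0
               if cj ≤ x then cj else pvInnerA costs x js

def final_supply_costs (costs : List Int) : List Int :=
  let n := costs.length
  if costs.isEmpty then []
  else if n = 1 then costs
  else (List.range n).map (fun i =>
    costs.getD i 0 - pvInnerA costs (costs.getD i 0) (List.range' (i+1) (n - (i+1))))

-- ===== PORT B =====
-- 'for x in reversed(costs)' with a stack: the while-pop loop is dropWhile, the result is prepended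
def final_supply_costs_alt (costs : List Int) : List Int :=
  (costs.foldr (fun x acc =>
    let st := acc.1.dropWhile (fun y => decide (x < y))
    (x :: st, (x - st.headD 0) :: acc.2)) (([] : List Int), ([] : List Int))).2

-- ===== PRECONDITION & SPEC =====
def Spec_final_supply_costs (costs : List Int) (out : List Int) : Prop := out = final_supply_costs_alt costs
instance (costs : List Int) (out : List Int) : Decidable (Spec_final_supply_costs costs out) := by unfold Spec_final_supply_costs; infer_instance

-- ===== CLAIM (what is proved, stated in full; the proofs are below) =====
def Claim_equal_final_supply_costs : Prop := ∀ (costs : List Int), Dom_final_supply_costs costs → Spec_final_supply_costs costs (final_supply_costs costs)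

-- ===== LEMMAS AND PROOFS =====

-- first element ≤ x of a list, else 0: the value A's inner scan computes over the suffix
def pvFd (x : Int) : List Int → Int
  | [] => 0
  | y :: t => if y ≤ x then y else pvFd x t

-- the stack B maintains after processing a suffix
def pvStk : List Int → List Int
  | [] => []
  | x :: t => x :: (pvStk t).dropWhile (fun y => decide (x < y))

theorem pvDropWhile_dropWhile (p q : Int → Bool) (h : ∀ z, q z = true → p z = true)
    (l : List Int) : (l.dropWhile q).dropWhile p = l.dropWhile p := by
  induction l with
  | nil => rfl
  | cons z t ih =>
    by_cases hq : q z = true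
    · simp [List.dropWhile, hq, h z hq, ih]
    · simp [List.dropWhile, hq]

-- the stack answers A's inner-scan query
theorem pvStk_query (x : Int) (l : List Int) :
    ((pvStk l).dropWhile (fun y => decide (x < y))).head?.getD 0 = pvFd x l := by
  induction l with
  | nil => rfl
  | cons y t ih =>
    by_cases hy : y ≤ x
    · simp [pvStk, pvFd, hy, not_lt.mpr hy]
    · have hy' : x < y := not_le.mp hy
      simp only [pvStk, pvFd, if_neg hy]
      rw [List.dropWhile_cons_of_pos (by simpa using hy'),
        pvDropWhile_dropWhile (fun z => decide (x < z)) (fun z => decide (y < z))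
          (by intro z hz; simp at hz ⊢; omega), ih]

theorem pvInnerA_suffix (costs : List Int) (x : Int) (j : Nat) :
    pvInnerA costs x (List.range' j (costs.length - j)) = pvFd x (costs.drop j) := by
  by_cases h : j < costs.length
  · have hlen : costs.length - j = (costs.length - (j+1)) + 1 := by omega
    rw [hlen, List.range'_succ]
    have hd : costs.drop j = costs[j] :: costs.drop (j+1) := List.drop_eq_getElem_cons h
    rw [hd]
    simp only [pvInnerA, pvFd, List.getD, List.getElem?_eq_getElem h, Option.getD_some]
    by_cases hc : costs[j] ≤ x
    · simp [hc]
    · simp only [if_neg hc]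
      exact pvInnerA_suffix costs x (j+1)
  · have : costs.length - j = 0 := by omega
    rw [this, List.drop_eq_nil_of_le (by omega)]
    rfl
termination_by costs.length - j

-- B's fold computes (stack, list of x - pvFd x suffix)
theorem pvAlt_eq (costs : List Int) :
    (costs.foldr (fun x acc =>
      let st := acc.1.dropWhile (fun y => decide (x < y))
      ((x :: st, (x - st.headD 0) :: acc.2) : List Int × List Int)) ([], [])) =
    (pvStk costs, (List.range costs.length).map (fun i =>
      costs.getD i 0 - pvFd (costs.getD i 0) (costs.drop (i+1)))) := by
  induction costs with
  | nil => rfl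
  | cons x t ih =>
    simp only [List.foldr_cons, ih, pvStk]
    refine Prod.ext rfl ?_
    simp only [List.length_cons, List.range_succ_eq_map, List.map_cons, List.map_map]
    congr 1
    simp only [List.getD, List.getElem?_cons_zero, Option.getD_some,
      List.headD_eq_head?, pvStk_query]
    simp

theorem final_supply_costs_spec : Claim_equal_final_supply_costs := by
  intro costs _
  unfold Spec_final_supply_costs final_supply_costs final_supply_costs_alt
  rw [pvAlt_eq]
  simp only
  have key : (List.range costs.length).map (fun i =>
      costs.getD i 0 - pvInnerA costs (costs.getD i 0) (List.range' (i+1) (costs.length - (i+1)))) =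
      (List.range costs.length).map (fun i =>
      costs.getD i 0 - pvFd (costs.getD i 0) (costs.drop (i+1))) := by
    apply List.map_congr_left
    intro i _
    rw [pvInnerA_suffix]
  match costs with
  | [] => rfl
  | [x] => simp [pvFd]
  | x :: y :: t =>
    rw [if_neg (by simp), if_neg (by simp)]
    exact key
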